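-- pv_equiv track=rewrite | github.com/BogdanTyelnyy/cursova2024-1 | compiler.py | __make_beautiful
-- ===== SOURCE A (Python) =====
-- from math import sin, cos, log, log10, tan, sqrt, e, pi
--
-- def __make_beautiful(s):
--     s = "(" + s + ")"
--     s = s.replace(" ", "")
--     temp = ""
--     for i in range(len(s)):
--         if s[i] in '-+' and s[i - 1] in '(+-*/^':
--             temp += "0"
--         if i > 0 and s[i] in '(xcltsep' and s[i - 1] in '0123456789)x':
--             temp += "*"
--         temp += s[i]
--     s = temp
--     s = s.replace("e", str(e))
--     s = s.replace("pi", str(pi))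
--     return s
-- ===== SOURCE B (Python) =====
-- from math import e, pi
--
-- def __make_beautiful(s):
--     t = "(" + s.replace(" ", "") + ")"
--     # pass 1: insert "0" before a unary +/- (operator/open-paren on the left)
--     zeroed = t[0] + "".join(
--         ("0" if c in "+-" and p in "(+-*/^" else "") + c
--         for p, c in zip(t, t[1:]))
--     # pass 2: insert "*" for implicit multiplication (digit/')'/'x' followed by '('/x/function/constant letter)
--     starred = zeroed[0] + "".join(
--         ("*" if c in "(xcltsep" and p in "0123456789)x" else "") + c
--         for p, c in zip(zeroed, zeroed[1:]))
--     return starred.replace("e", str(e)).replace("pi", str(pi))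
-- ===== Notes on version B (the rewrite author's own statement) =====
-- stated objective: idiomatic
-- what changed: A's single index loop reading s[i]/s[i-1] (with a negative-index wrap at i=0) is replaced by two sequential pairwise passes over zip(t, t[1:]): one inserting the implicit zero digit before a unary sign, then one inserting the implicit multiplication sign; an inserted zero digit never creates or destroys a multiplication site, so the output is byte-identical.
import Mathlib
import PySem

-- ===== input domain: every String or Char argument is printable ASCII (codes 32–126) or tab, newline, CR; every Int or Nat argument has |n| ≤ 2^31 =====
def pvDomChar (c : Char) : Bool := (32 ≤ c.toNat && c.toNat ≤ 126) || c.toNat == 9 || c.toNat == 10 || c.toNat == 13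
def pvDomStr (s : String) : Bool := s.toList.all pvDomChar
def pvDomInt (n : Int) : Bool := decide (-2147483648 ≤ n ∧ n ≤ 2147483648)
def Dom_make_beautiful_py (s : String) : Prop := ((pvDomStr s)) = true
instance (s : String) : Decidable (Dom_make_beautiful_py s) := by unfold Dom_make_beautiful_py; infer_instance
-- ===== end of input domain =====

-- B replaces A's index loop (s[i]/s[i-1]) by two sequential pairwise passes over adjacent pairs:
-- first insert the implicit zero digit, then the implicit multiplication sign. Same return value; no side effects.

-- ===== PORT A =====
-- A's loop body: temp is the accumulator, i the Python index (s[i-1] at i=0 wraps to the last char).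
-- pyGetD with default ' ' is safe: 0 ≤ i < len and -1 ≤ i-1 < len, and t is nonempty, so Python never raises here.
def pvAstep (t : List Char) (temp : List Char) (i : Int) : List Char :=
  let c := PySem.List.pyGetD t i ' '
  let p := PySem.List.pyGetD t (i - 1) ' '
  let temp1 := if c ∈ "-+".toList ∧ p ∈ "(+-*/^".toList then temp ++ ['0'] else temp
  let temp2 := if 0 < i ∧ c ∈ "(xcltsep".toList ∧ p ∈ "0123456789)x".toList then temp1 ++ ['*'] else temp1
  temp2 ++ [c]

def make_beautiful_py (s : String) : String :=
  let t := PySem.Chars.replace ('(' :: s.toList ++ [')']) [' '] []   -- ("(" + s + ")").replace(" ", "")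
  let temp := (PySem.List.pyRange 0 t.length 1).foldl (pvAstep t) []
  let r := PySem.Chars.replace temp ['e'] "2.718281828459045".toList -- s.replace("e", str(e))
  String.ofList (PySem.Chars.replace r ['p', 'i'] "3.141592653589793".toList) -- s.replace("pi", str(pi))

-- ===== PORT B =====
def pvIns0 (p c : Char) : List Char :=
  if c ∈ "+-".toList ∧ p ∈ "(+-*/^".toList then ['0'] else []

def pvInsS (p c : Char) : List Char :=
  if c ∈ "(xcltsep".toList ∧ p ∈ "0123456789)x".toList then ['*'] else []

-- the join over zip(u, u[1:]): prev char carried, insertion before each current char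
def pvPass (ins : Char → Char → List Char) : Char → List Char → List Char
  | _, [] => []
  | p, c :: cs => ins p c ++ c :: pvPass ins c cs

def make_beautiful_py_alt (s : String) : String :=
  -- t = "(" + s.replace(" ", "") + ")" : head is the literal '(', so t[0] (and zeroed[0]) is '('
  let m := PySem.Chars.replace s.toList [' '] [] ++ [')']
  let zeroed := '(' :: pvPass pvIns0 '(' m
  let starred := '(' :: pvPass pvInsS '(' zeroed.tail
  let r := PySem.Chars.replace starred ['e'] "2.718281828459045".toList
  String.ofList (PySem.Chars.replace r ['p', 'i'] "3.141592653589793".toList)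

-- ===== PRECONDITION & SPEC =====
def Spec_make_beautiful_py (s : String) (out : String) : Prop := out = make_beautiful_py_alt s
instance (s : String) (out : String) : Decidable (Spec_make_beautiful_py s out) := by unfold Spec_make_beautiful_py; infer_instance

-- ===== CLAIM (what is proved, stated in full; the proofs are below) =====
def Claim_equal_make_beautiful_py : Prop := ∀ (s : String), Dom_make_beautiful_py s → Spec_make_beautiful_py s (make_beautiful_py s)

-- ===== LEMMAS AND PROOFS =====

-- replace with old = " " and new = "" is exactly a filter (characterisation of this specific call)
lemma pvGoSpace (fuel : Nat) (l acc : List Char) (h : l.length ≤ fuel) :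
    PySem.Chars.replace.go [' '] [] fuel l acc = acc.reverse ++ l.filter (fun c => c ≠ ' ') := by
  induction fuel generalizing l acc with
  | zero =>
    have : l = [] := List.eq_nil_of_length_eq_zero (Nat.le_zero.mp h)
    subst this; simp [PySem.Chars.replace.go]
  | succ n ih =>
    cases l with
    | nil => simp [PySem.Chars.replace.go]
    | cons c t =>
      have hlen : t.length ≤ n := by simpa using Nat.le_of_succ_le_succ h
      by_cases hc : c = ' '
      · subst hc
        simp [PySem.Chars.replace.go, List.isPrefixOf, ih t acc hlen]
      · have hpre : ([' '] : List Char).isPrefixOf (c :: t) = false := by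
          simp [List.isPrefixOf]
          exact fun hh => hc hh.symm
        simp [PySem.Chars.replace.go, hpre, ih t (c :: acc) hlen, hc]

lemma pvReplaceSpace (cs : List Char) :
    PySem.Chars.replace cs [' '] [] = cs.filter (fun c => c ≠ ' ') := by
  rw [PySem.Chars.replace]
  simp only [List.isEmpty_cons, Bool.false_eq_true, if_false]
  simpa using pvGoSpace cs.length cs [] le_rfl

-- the fused single pass both programs compute (proof-only device)
def pvOne : Char → List Char → List Char
  | _, [] => []
  | p, c :: cs => pvIns0 p c ++ pvInsS p c ++ c :: pvOne c cs

-- B's two sequential passes equal the fused pass: an inserted '0' is never part of a '*' site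
lemma pvTwoPasses (cs : List Char) (p : Char) :
    pvPass pvInsS p (pvPass pvIns0 p cs) = pvOne p cs := by
  induction cs generalizing p with
  | nil => simp [pvPass, pvOne]
  | cons c cs ih =>
    by_cases h : c ∈ "+-".toList ∧ p ∈ "(+-*/^".toList
    · have hins0 : pvIns0 p c = ['0'] := by unfold pvIns0; rw [if_pos h]
      have hc : c = '+' ∨ c = '-' := by
        have h1 := h.1
        rw [show "+-".toList = ['+', '-'] from rfl] at h1
        simpa using h1
      have hSp0 : pvInsS p '0' = [] := by
        unfold pvInsS; rw [if_neg]; rintro ⟨h1, -⟩; revert h1; decide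
      have hS0c : pvInsS '0' c = [] := by
        unfold pvInsS; rw [if_neg]; rintro ⟨h1, -⟩
        rcases hc with rfl | rfl <;> revert h1 <;> decide
      have hSpc : pvInsS p c = [] := by
        unfold pvInsS; rw [if_neg]; rintro ⟨h1, -⟩
        rcases hc with rfl | rfl <;> revert h1 <;> decide
      simp [pvPass, pvOne, hins0, hSp0, hS0c, hSpc, ih]
    · have hins0 : pvIns0 p c = [] := by unfold pvIns0; rw [if_neg h]
      simp [pvPass, pvOne, hins0, ih]

-- A's index fold from index k ≥ 1 equals the fused pass over the suffix, prev = t[k-1]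
lemma pvAfold (t : List Char) (k : Nat) (acc : List Char) (hk : 1 ≤ k) :
    (PySem.List.pyRange (k : Int) (t.length : Int) 1).foldl (pvAstep t) acc
      = acc ++ pvOne (t.getD (k - 1) ' ') (t.drop k) := by
  by_cases hlt : k < t.length
  · have hdrop : t.drop k = t[k] :: t.drop (k + 1) := List.drop_eq_getElem_cons hlt
    have hstep : pvAstep t acc (k : Int)
        = acc ++ (pvIns0 (t.getD (k - 1) ' ') t[k] ++ pvInsS (t.getD (k - 1) ' ') t[k] ++ [t[k]]) := by
      have hc : PySem.List.pyGetD t (k : Int) ' ' = t[k] := by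
        rw [PySem.List.pyGetD_natCast]; exact List.getD_eq_getElem t ' ' hlt
      have hp : PySem.List.pyGetD t ((k : Int) - 1) ' ' = t.getD (k - 1) ' ' := by
        have he : (k : Int) - 1 = ((k - 1 : Nat) : Int) := by omega
        rw [he, PySem.List.pyGetD_natCast]
      have hpos : (0 : Int) < (k : Int) := by exact_mod_cast hk
      have hmm : ∀ a : Char, a ∈ ['-', '+'] ↔ a ∈ ['+', '-'] := by
        intro a; simp; tauto
      simp only [pvAstep, pvIns0, pvInsS, hc, hp, hpos, true_and,
        show "-+".toList = ['-', '+'] from rfl, show "+-".toList = ['+', '-'] from rfl, hmm]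
      split_ifs <;> simp
    have hcons : PySem.List.pyRange (k : Int) (t.length : Int) 1
        = (k : Int) :: PySem.List.pyRange ((k : Int) + 1) (t.length : Int) 1 :=
      PySem.List.pyRange_one_cons (by exact_mod_cast hlt)
    rw [hcons, List.foldl_cons, hstep]
    have h1 : ((k : Int) + 1) = ((k + 1 : Nat) : Int) := by push_cast; ring
    rw [h1, pvAfold t (k + 1) _ (by omega)]
    have hgd : t.getD (k + 1 - 1) ' ' = t[k] := by
      simp [List.getD, List.getElem?_eq_getElem hlt]
    rw [hgd, hdrop]
    simp [pvOne, List.append_assoc]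
  · have hnil : PySem.List.pyRange (k : Int) (t.length : Int) 1 = [] :=
      PySem.List.pyRange_one_eq_nil (by exact_mod_cast Nat.le_of_not_lt hlt)
    have hdrop : t.drop k = [] := List.drop_eq_nil_of_le (Nat.le_of_not_lt hlt)
    simp [hnil, hdrop, pvOne]
termination_by t.length - k

-- A's whole loop over t = '(' :: m equals '(' followed by the fused pass from prev '('
lemma pvAloop (m : List Char) :
    (PySem.List.pyRange 0 (('(' :: m).length : Int) 1).foldl (pvAstep ('(' :: m)) []
      = '(' :: pvOne '(' m := by
  have hpos : (0 : Int) < (('(' :: m).length : Int) := by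
    simp
  rw [PySem.List.pyRange_one_cons hpos, List.foldl_cons]
  have hstep : pvAstep ('(' :: m) [] 0 = ['('] := by
    simp [pvAstep, PySem.List.pyGetD]
  rw [hstep]
  have h01 : (0 : Int) + 1 = ((1 : Nat) : Int) := by norm_num
  rw [h01, pvAfold ('(' :: m) 1 ['('] le_rfl]
  simp

-- ===== VERDICT (by name: the statement is the Claim_ definition above) =====
theorem make_beautiful_py_spec : Claim_equal_make_beautiful_py := by
  intro s _
  show make_beautiful_py s = make_beautiful_py_alt s
  have ht : PySem.Chars.replace ('(' :: s.toList ++ [')']) [' '] []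
      = '(' :: (PySem.Chars.replace s.toList [' '] [] ++ [')']) := by
    rw [pvReplaceSpace, pvReplaceSpace]
    simp
  simp only [make_beautiful_py, make_beautiful_py_alt, ht, pvAloop, List.tail_cons, pvTwoPasses]
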